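-- pv_equiv track=rewrite | github.com/hoya9802/Algorithm-Notes | 프로그래머스/2/12899. 124 나라의 숫자/124 나라의 숫자.py | solution
-- ===== SOURCE A (Python) =====
-- from collections import deque
--
-- def solution(n):
--     res = deque()
--     while n > 0:
--         if n%3 == 0:
--             res.appendleft('4')
--             n -= 1
--         else:
--             res.appendleft(str(n%3))
--         n //= 3
--     return ''.join(res)
-- ===== SOURCE B (Python) =====
-- def solution(n):
--     if n <= 0:
--         return ''
--     q, r = divmod(n - 1, 3)
--     return solution(q) + '124'[r]
-- ===== Notes on version B (the rewrite author's own statement) =====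
-- stated objective: simpler
-- what changed: Replaced the deque-building while loop with its explicit '4' special-case branch by a three-line recursion on divmod(n-1,3) indexing into the digit table '124'.
import Mathlib
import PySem

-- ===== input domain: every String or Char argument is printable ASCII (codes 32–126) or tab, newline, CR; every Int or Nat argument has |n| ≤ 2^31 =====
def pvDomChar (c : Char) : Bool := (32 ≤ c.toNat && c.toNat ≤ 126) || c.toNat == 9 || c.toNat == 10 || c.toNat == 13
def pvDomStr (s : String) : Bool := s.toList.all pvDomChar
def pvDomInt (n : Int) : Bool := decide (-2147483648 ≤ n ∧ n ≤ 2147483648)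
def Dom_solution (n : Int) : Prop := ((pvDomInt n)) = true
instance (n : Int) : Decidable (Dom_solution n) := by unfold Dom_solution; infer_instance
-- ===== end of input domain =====

-- B replaces A's deque-building while loop (with its '4' special case) by a three-line
-- recursion on divmod(n-1,3) indexing the digit table '124': simpler decomposition, same cost.

-- ===== PORT A =====
-- the while loop: res is the deque (appendleft = cons), joined at the end
def solutionLoopA (n : Int) (res : List String) : List String :=
  if _h : 0 < n then
    if PySem.Int.mod n 3 = 0 then
      solutionLoopA (PySem.Int.floordiv (n - 1) 3) ("4" :: res)
    else
      solutionLoopA (PySem.Int.floordiv n 3) (PySem.Int.toStr (PySem.Int.mod n 3) :: res)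
  else res
  termination_by n.toNat
  decreasing_by
  · have h1 : PySem.Int.floordiv (n - 1) 3 = (n - 1) / 3 :=
      PySem.Int.floordiv_eq_ediv_of_pos (by omega)
    rw [h1]; omega
  · have h1 : PySem.Int.floordiv n 3 = n / 3 :=
      PySem.Int.floordiv_eq_ediv_of_pos (by omega)
    rw [h1]; omega

def solution (n : Int) : String := String.join (solutionLoopA n [])

-- ===== PORT B =====
def solution_alt (n : Int) : String :=
  if n ≤ 0 then "" else
    let q := PySem.Int.floordiv (n - 1) 3
    let r := PySem.Int.mod (n - 1) 3
    solution_alt q ++ ((PySem.Str.pyGet? "124" r).map String.singleton).getD ""   -- '124'[r]; r ∈ {0,1,2} so the index is always in range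
  termination_by n.toNat
  decreasing_by
    have h1 : PySem.Int.floordiv (n - 1) 3 = (n - 1) / 3 :=
      PySem.Int.floordiv_eq_ediv_of_pos (by omega)
    rw [h1]; omega

-- ===== PRECONDITION & SPEC =====
def Spec_solution (n : Int) (out : String) : Prop := out = solution_alt n
instance (n : Int) (out : String) : Decidable (Spec_solution n out) := by unfold Spec_solution; infer_instance

-- ===== CLAIM (what is proved, stated in full; the proofs are below) =====
def Claim_equal_solution : Prop := ∀ (n : Int), Dom_solution n → Spec_solution n (solution n)

-- ===== LEMMAS AND PROOFS =====

theorem foldl_append_init (l : List String) (a : String) :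
    List.foldl (fun r s => r ++ s) a l = a ++ List.foldl (fun r s => r ++ s) "" l := by
  induction l generalizing a with
  | nil => simp
  | cons x xs ih => simp only [List.foldl]; rw [ih (a ++ x), ih ("" ++ x)]; simp [String.append_assoc]

theorem loop_join (N : Nat) : ∀ (n : Int), n.toNat ≤ N → ∀ (res : List String),
    String.join (solutionLoopA n res) = solution_alt n ++ String.join res := by
  induction N with
  | zero =>
    intro n hn res
    have hle : n ≤ 0 := by omega
    rw [solutionLoopA, solution_alt]
    simp [hle, not_lt.mpr hle]
  | succ N ih =>
    intro n hn res
    by_cases hpos : 0 < n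
    · have hm : PySem.Int.mod n 3 = n % 3 := PySem.Int.mod_eq_emod_of_pos (by omega)
      have hm' : PySem.Int.mod (n - 1) 3 = (n - 1) % 3 := PySem.Int.mod_eq_emod_of_pos (by omega)
      have hd : PySem.Int.floordiv (n - 1) 3 = (n - 1) / 3 :=
        PySem.Int.floordiv_eq_ediv_of_pos (by omega)
      have hd' : PySem.Int.floordiv n 3 = n / 3 :=
        PySem.Int.floordiv_eq_ediv_of_pos (by omega)
      have hqle : ((n - 1) / 3).toNat ≤ N := by omega
      have hqle' : (n / 3).toNat ≤ N := by omega
      rw [solutionLoopA]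
      rw [dif_pos hpos]
      conv_rhs => rw [solution_alt]
      rw [if_neg (by omega : ¬ n ≤ 0)]
      rw [hm, hm', hd]
      have h3 : n % 3 = 0 ∨ n % 3 = 1 ∨ n % 3 = 2 := by omega
      rcases h3 with h0 | h1 | h2
      · have hr : (n - 1) % 3 = 2 := by omega
        rw [if_pos h0, hr, ih _ hqle]
        simp only [String.join, List.foldl]
        rw [foldl_append_init res]
        simp [PySem.List.pyGet?, PySem.List.pyIdx?, String.singleton, String.append_assoc]
      · have hr : (n - 1) % 3 = 0 := by omega
        have hq : (n - 1) / 3 = n / 3 := by omega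
        rw [if_neg (by omega : ¬ n % 3 = 0), hd', hq, ih _ hqle']
        have : PySem.Int.toStr (n % 3) = "1" := by rw [h1]; rfl
        rw [this, hr]
        simp only [String.join, List.foldl]
        rw [foldl_append_init res]
        simp [PySem.List.pyGet?, PySem.List.pyIdx?, String.singleton, String.append_assoc]
      · have hr : (n - 1) % 3 = 1 := by omega
        have hq : (n - 1) / 3 = n / 3 := by omega
        rw [if_neg (by omega : ¬ n % 3 = 0), hd', hq, ih _ hqle']
        have : PySem.Int.toStr (n % 3) = "2" := by rw [h2]; rfl
        rw [this, hr]
        simp only [String.join, List.foldl]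
        rw [foldl_append_init res]
        simp [PySem.List.pyGet?, PySem.List.pyIdx?, String.singleton, String.append_assoc]
    · rw [solutionLoopA, solution_alt]
      simp [hpos, (by omega : n ≤ 0)]

-- ===== VERDICT (by name: the statement is the Claim_ definition above) =====
theorem solution_spec : Claim_equal_solution := by
  intro n _
  unfold Spec_solution solution
  have := loop_join n.toNat n (le_refl _) []
  simpa [String.join] using this
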